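-- pv_equiv track=rewrite | github.com/dianagarbanzo/bases-tec | graph-example.py | get_nodes_label
-- ===== SOURCE A (Python) =====
-- def get_nodes_label(graph, root, levels, predecessors):
--     nodes_credits = {root:1}
--
--     for values in levels.values():
--         for node in values:
--             if(node != root):
--                 shortest_paths = 0
--                 for pre in predecessors[node]:
--                     shortest_paths += nodes_credits[pre]
--                 nodes_credits[node] = shortest_paths
--
--     return nodes_credits
-- ===== SOURCE B (Python) =====
-- def get_nodes_label(graph, root, levels, predecessors):
--     # Top-down memoized recursion over the predecessor DAG; the result dict is the memo.
--     nodes_credits = {root: 1}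
--
--     def credits(node):
--         if node in nodes_credits:
--             return nodes_credits[node]
--         return sum(credits(p) for p in predecessors[node])
--
--     for nodes in levels.values():
--         for node in nodes:
--             if node != root:
--                 nodes_credits[node] = credits(node)
--     return nodes_credits
-- ===== Notes on version B (the rewrite author's own statement) =====
-- stated objective: alternative
-- what changed: A's bottom-up level sweep that sums already-stored credits is replaced by a top-down memoized recursion credits(node) over the predecessor DAG, using the result dict (seeded only with root) as the memo.
import Mathlib
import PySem

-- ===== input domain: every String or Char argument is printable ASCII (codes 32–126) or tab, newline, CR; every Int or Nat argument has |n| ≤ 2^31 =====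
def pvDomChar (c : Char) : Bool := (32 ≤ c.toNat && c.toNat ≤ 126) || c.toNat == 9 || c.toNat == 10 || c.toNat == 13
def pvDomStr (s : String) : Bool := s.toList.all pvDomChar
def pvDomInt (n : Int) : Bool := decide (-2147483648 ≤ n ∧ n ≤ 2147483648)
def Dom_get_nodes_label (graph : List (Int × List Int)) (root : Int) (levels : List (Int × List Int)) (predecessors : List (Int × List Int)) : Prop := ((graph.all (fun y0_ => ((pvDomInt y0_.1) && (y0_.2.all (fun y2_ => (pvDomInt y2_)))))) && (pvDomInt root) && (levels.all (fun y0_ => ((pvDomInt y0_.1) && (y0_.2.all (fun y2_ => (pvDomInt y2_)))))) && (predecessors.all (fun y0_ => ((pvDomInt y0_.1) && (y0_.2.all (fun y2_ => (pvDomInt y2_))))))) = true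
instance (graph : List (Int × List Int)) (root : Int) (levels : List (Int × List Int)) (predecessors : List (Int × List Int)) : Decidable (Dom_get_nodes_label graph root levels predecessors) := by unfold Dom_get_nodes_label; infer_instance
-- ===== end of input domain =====

-- B replaces A's bottom-up level sweep by a top-down memoized recursion over the
-- predecessor DAG (the result dict as the memo); same cost, alternative decomposition.


-- ===== PORT A =====
def get_nodes_label (graph : List (Int × List Int)) (root : Int) (levels : List (Int × List Int)) (predecessors : List (Int × List Int)) : List (Int × Int) :=
  -- nodes_credits = {root: 1}; for values in levels.values(): for node in values: …
  (((PySem.Dict.ofList levels).values).foldl (fun nc values =>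
    values.foldl (fun nc node =>
      if node ≠ root then
        -- shortest_paths = 0; for pre in predecessors[node]: shortest_paths += nodes_credits[pre]
        -- (lookups total via getD; Pre_ excludes exactly the KeyError inputs)
        nc.insert node (((PySem.Dict.ofList predecessors).getD node []).foldl
          (fun sp pre => sp + nc.getD pre 0) 0)
      else nc) nc)
    ((PySem.Dict.empty).insert root 1)).items

-- ===== PORT B =====
-- credits(node): memo hit, else sum of credits of the predecessors; fuel only makes it total
def creditsB (preds : PySem.Dict Int (List Int)) (memo : PySem.Dict Int Int) : Nat → Int → Int
  | 0, _ => 0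
  | fuel + 1, node =>
    match memo.get? node with
    | some v => v
    | none => ((preds.getD node []).map (fun p => creditsB preds memo fuel p)).sum

def get_nodes_label_alt (graph : List (Int × List Int)) (root : Int) (levels : List (Int × List Int)) (predecessors : List (Int × List Int)) : List (Int × Int) :=
  (((PySem.Dict.ofList levels).values).foldl (fun memo nodes =>
    nodes.foldl (fun memo node =>
      if node ≠ root then
        memo.insert node (creditsB (PySem.Dict.ofList predecessors) memo (predecessors.length + 1) node)
      else memo) memo)
    ((PySem.Dict.empty).insert root 1)).items

-- ===== PRECONDITION & SPEC =====
-- Pre_ excludes exactly the inputs on which A raises KeyError: a non-root level node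
-- missing from predecessors, or a predecessor that is neither the root nor a node of an
-- earlier position of the flattened level lists (so it has no credit yet).
def Pre_get_nodes_label (graph : List (Int × List Int)) (root : Int) (levels : List (Int × List Int)) (predecessors : List (Int × List Int)) : Prop :=
  ∀ i (h : i < (((PySem.Dict.ofList levels).values).flatten).length),
    (((PySem.Dict.ofList levels).values).flatten)[i] ≠ root →
      (PySem.Dict.ofList predecessors).contains ((((PySem.Dict.ofList levels).values).flatten)[i]) = true ∧
      ∀ p ∈ (PySem.Dict.ofList predecessors).getD ((((PySem.Dict.ofList levels).values).flatten)[i]) [],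
        p = root ∨ p ∈ (((PySem.Dict.ofList levels).values).flatten).take i

instance (graph : List (Int × List Int)) (root : Int) (levels : List (Int × List Int)) (predecessors : List (Int × List Int)) : Decidable (Pre_get_nodes_label graph root levels predecessors) := by unfold Pre_get_nodes_label; infer_instance

def pvWitness_get_nodes_label : (List (Int × List Int)) × Int × (List (Int × List Int)) × (List (Int × List Int)) :=
  ([], 0, [(1, [1, 2]), (2, [3])], [(1, [0]), (2, [0, 1]), (3, [1, 2])])

def Spec_get_nodes_label (graph : List (Int × List Int)) (root : Int) (levels : List (Int × List Int)) (predecessors : List (Int × List Int)) (out : List (Int × Int)) : Prop := out = get_nodes_label_alt graph root levels predecessors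
instance (graph : List (Int × List Int)) (root : Int) (levels : List (Int × List Int)) (predecessors : List (Int × List Int)) (out : List (Int × Int)) : Decidable (Spec_get_nodes_label graph root levels predecessors out) := by unfold Spec_get_nodes_label; infer_instance

-- ===== CLAIM (what is proved, stated in full; the proofs are below) =====
def Claim_equal_get_nodes_label : Prop := ∀ (graph : List (Int × List Int)) (root : Int) (levels : List (Int × List Int)) (predecessors : List (Int × List Int)), Dom_get_nodes_label graph root levels predecessors → Pre_get_nodes_label graph root levels predecessors → Spec_get_nodes_label graph root levels predecessors (get_nodes_label graph root levels predecessors)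

-- ===== LEMMAS AND PROOFS =====

-- invariant carried along the flattened node list: S is the list of already-processed nodes
def pvInv (preds : PySem.Dict Int (List Int)) (root : Int) (S : List Int) (d : PySem.Dict Int Int) : Prop :=
  (∀ x, d.contains x = true ↔ (x = root ∨ (x ∈ S ∧ x ≠ root))) ∧
  (∀ n v, n ≠ root → d.get? n = some v →
    preds.contains n = true ∧
    (∀ p ∈ preds.getD n [], d.contains p = true) ∧
    v = (preds.getD n []).foldl (fun sp pre => sp + d.getD pre 0) 0)


theorem creditsB_memo (preds : PySem.Dict Int (List Int)) (memo : PySem.Dict Int Int)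
    (fuel : Nat) (node : Int) (v : Int) (h : memo.get? node = some v) :
    creditsB preds memo (fuel + 1) node = v := by
  simp [creditsB, h]

theorem creditsB_none (preds : PySem.Dict Int (List Int)) (memo : PySem.Dict Int Int)
    (fuel : Nat) (node : Int) (h : memo.get? node = none) :
    creditsB preds memo (fuel + 1) node
      = ((preds.getD node []).map (fun p => creditsB preds memo fuel p)).sum := by
  simp [creditsB, h]

theorem pvContains_ne_nil (predecessors : List (Int × List Int)) (node : Int)
    (h : (PySem.Dict.ofList predecessors).contains node = true) : 1 ≤ predecessors.length := by
  cases predecessors with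
  | nil => simp [PySem.Dict.ofList, PySem.Dict.update, PySem.Dict.contains_empty] at h
  | cons a l => simp

theorem pvContains_of_mem (P : PySem.Dict Int (List Int)) (root : Int) (S : List Int)
    (d : PySem.Dict Int Int) (hInv : pvInv P root S d) (p : Int)
    (hp : p = root ∨ p ∈ S) : d.contains p = true := by
  rcases hp with rfl | hp
  · exact (hInv.1 p).2 (Or.inl rfl)
  · by_cases hr : p = root
    · exact (hInv.1 p).2 (Or.inl hr)
    · exact (hInv.1 p).2 (Or.inr ⟨hp, hr⟩)

theorem pvGetD_of_contains (d : PySem.Dict Int Int) (p : Int) (h : d.contains p = true) :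
    ∃ w, d.get? p = some w := by
  rw [PySem.Dict.contains_eq_isSome_get?] at h
  exact Option.isSome_iff_exists.mp h

-- the single-node step: A's stored sum equals B's credits call, and the invariant is preserved
theorem pvStep (P : PySem.Dict Int (List Int)) (root : Int) (S : List Int)
    (d : PySem.Dict Int Int) (node : Int) (m : Nat)
    (hm : ∀ n, P.contains n = true → 1 ≤ m)
    (hInv : pvInv P root S d)
    (H0 : node ≠ root → P.contains node = true ∧
      ∀ p ∈ P.getD node [], p = root ∨ p ∈ S) :
    ((node ≠ root → creditsB P d (m + 1) node =
        (P.getD node []).foldl (fun sp pre => sp + d.getD pre 0) 0) ∧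
      pvInv P root (S ++ [node])
        (if node ≠ root then
          d.insert node ((P.getD node []).foldl (fun sp pre => sp + d.getD pre 0) 0)
        else d)) := by
  by_cases hne : node = root
  · rw [if_neg (not_not_intro hne)]
    refine ⟨fun h => absurd hne h, ?_, ?_⟩
    · intro x
      rw [hInv.1 x]
      simp only [List.mem_append, List.mem_singleton]
      constructor
      · rintro (rfl | ⟨hx, hxr⟩)
        · exact Or.inl rfl
        · exact Or.inr ⟨Or.inl hx, hxr⟩
      · rintro (rfl | ⟨hx | rfl, hxr⟩)
        · exact Or.inl rfl
        · exact Or.inr ⟨hx, hxr⟩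
        · exact absurd hne hxr
    · intro n v hn hv
      exact hInv.2 n v hn hv
  · have H0' := H0 hne
    simp only [if_pos hne]
    set sA := (P.getD node []).foldl (fun sp pre => sp + d.getD pre 0) 0 with hsA
    -- all predecessors of node are keys of d
    have hpred : ∀ p ∈ P.getD node [], d.contains p = true := by
      intro p hp
      exact pvContains_of_mem P root S d hInv p (H0'.2 p hp)
    -- (V): inserting (node, sA) does not change the value stored at any existing key
    have hV : ∀ p, d.contains p = true → (d.insert node sA).getD p 0 = d.getD p 0 := by
      intro p hp
      by_cases hpn : p = node
      · subst hpn
        obtain ⟨w, hw⟩ := pvGetD_of_contains d p hp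
        have := (hInv.2 p w hne hw).2.2
        rw [PySem.Dict.getD_insert_self, PySem.Dict.getD_of_get?_eq_some d 0 hw]
        rw [← hsA] at this
        exact this.symm
      · exact PySem.Dict.getD_insert_of_ne d sA 0 hpn
    have hcredits : creditsB P d (m + 1) node = sA := by
      cases hd : d.get? node with
      | some v =>
        rw [creditsB_memo P d m node v hd]
        exact (hInv.2 node v hne hd).2.2
      | none =>
        obtain ⟨m', rfl⟩ : ∃ m', m = m' + 1 := by
          have := hm node H0'.1
          exact ⟨m - 1, by omega⟩
        rw [creditsB_none P d (m' + 1) node hd]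
        have hmap : (P.getD node []).map (fun p => creditsB P d (m' + 1) p)
            = (P.getD node []).map (fun p => d.getD p 0) := by
          apply List.map_congr_left
          intro p hp
          obtain ⟨w, hw⟩ := pvGetD_of_contains d p (hpred p hp)
          rw [creditsB_memo P d m' p w hw, PySem.Dict.getD_of_get?_eq_some d 0 hw]
        rw [hmap, hsA, PySem.List.foldl_add]
        ring
    refine ⟨fun _ => hcredits, ?_, ?_⟩
    · -- keys of the new dict
      intro x
      rw [PySem.Dict.contains_insert]
      simp only [Bool.or_eq_true, beq_iff_eq, List.mem_append, List.mem_singleton]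
      rw [hInv.1 x]
      constructor
      · rintro (rfl | rfl | ⟨hx, hxr⟩)
        · exact Or.inr ⟨Or.inr rfl, hne⟩
        · exact Or.inl rfl
        · exact Or.inr ⟨Or.inl hx, hxr⟩
      · rintro (rfl | ⟨hx | rfl, hxr⟩)
        · exact Or.inr (Or.inl rfl)
        · exact Or.inr (Or.inr ⟨hx, hxr⟩)
        · exact Or.inl rfl
    · -- stored sums of the new dict
      intro n v hn hv
      by_cases hnn : n = node
      · subst hnn
        rw [PySem.Dict.get?_insert_self] at hv
        obtain rfl : sA = v := Option.some.inj hv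
        refine ⟨H0'.1, ?_, ?_⟩
        · intro p hp
          rw [PySem.Dict.contains_insert]
          simp [hpred p hp]
        · have : (P.getD n []).foldl (fun sp pre => sp + (d.insert n sA).getD pre 0) 0
              = (P.getD n []).foldl (fun sp pre => sp + d.getD pre 0) 0 := by
            rw [PySem.List.foldl_add, PySem.List.foldl_add]
            congr 1
            congr 1
            apply List.map_congr_left
            intro p hp
            exact hV p (hpred p hp)
          rw [this, hsA]
      · rw [PySem.Dict.get?_insert_of_ne d sA hnn] at hv
        obtain ⟨h1, h2, h3⟩ := hInv.2 n v hn hv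
        refine ⟨h1, ?_, ?_⟩
        · intro p hp
          rw [PySem.Dict.contains_insert]
          simp [h2 p hp]
        · rw [h3]
          rw [PySem.List.foldl_add, PySem.List.foldl_add]
          congr 1
          congr 1
          apply (List.map_congr_left ?_).symm
          intro p hp
          exact hV p (h2 p hp)

-- the fold over the flattened node list
theorem pvFold (P : PySem.Dict Int (List Int)) (root : Int) (m : Nat)
    (hm : ∀ n, P.contains n = true → 1 ≤ m) :
    ∀ (L S : List Int) (d : PySem.Dict Int Int),
    pvInv P root S d →
    (∀ i (h : i < L.length), L[i] ≠ root → P.contains L[i] = true ∧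
      ∀ p ∈ P.getD L[i] [], p = root ∨ p ∈ S ++ L.take i) →
    L.foldl (fun nc node =>
        if node ≠ root then
          nc.insert node ((P.getD node []).foldl (fun sp pre => sp + nc.getD pre 0) 0)
        else nc) d
      = L.foldl (fun memo node =>
        if node ≠ root then memo.insert node (creditsB P memo (m + 1) node) else memo) d := by
  intro L
  induction L with
  | nil => intro S d _ _; rfl
  | cons node L' ih =>
    intro S d hInv H
    have H0 : node ≠ root → P.contains node = true ∧
        ∀ p ∈ P.getD node [], p = root ∨ p ∈ S := by
      intro h
      have := H 0 (by simp) h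
      simpa using this
    obtain ⟨hcred, hInv'⟩ := pvStep P root S d node m hm hInv H0
    simp only [List.foldl_cons]
    have hstep : (if node ≠ root then
          d.insert node ((P.getD node []).foldl (fun sp pre => sp + d.getD pre 0) 0)
        else d)
        = (if node ≠ root then d.insert node (creditsB P d (m + 1) node) else d) := by
      by_cases h : node = root
      · simp [h]
      · rw [if_pos h, if_pos h, hcred h]
    rw [← hstep]
    apply ih (S ++ [node])
    · exact hInv'
    · intro i hi hroot
      have := H (i + 1) (by simpa using hi) (by simpa using hroot)
      simp only [List.getElem_cons_succ] at this
      refine ⟨this.1, ?_⟩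
      intro p hp
      rcases this.2 p hp with h | h
      · exact Or.inl h
      · right
        simp only [List.take_succ_cons, List.append_assoc] at h ⊢
        simpa using h

theorem pvInv_init (P : PySem.Dict Int (List Int)) (root : Int) :
    pvInv P root [] ((PySem.Dict.empty).insert root 1) := by
  constructor
  · intro x
    rw [PySem.Dict.contains_insert]
    simp [PySem.Dict.contains_empty]
  · intro n v hn hv
    rw [PySem.Dict.get?_insert_of_ne _ _ hn, PySem.Dict.get?_empty] at hv
    exact absurd hv (by simp)

-- ===== VERDICT (by name: the statement is the Claim_ definition above) =====
theorem get_nodes_label_spec : Claim_equal_get_nodes_label := by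
  intro graph root levels predecessors _ hPre
  unfold Spec_get_nodes_label get_nodes_label get_nodes_label_alt
  congr 1
  rw [← List.foldl_flatten, ← List.foldl_flatten]
  apply pvFold (PySem.Dict.ofList predecessors) root predecessors.length
    (fun n h => pvContains_ne_nil predecessors n h)
    (((PySem.Dict.ofList levels).values).flatten) [] _ (pvInv_init _ root)
  intro i hi hroot
  have := hPre i hi hroot
  simpa using this
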